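-- pv_equiv track=rewrite | github.com/GiriAditya14/kochi-metro-sih-2025 | agents/src/emergency/crisis_workflow.py | _identify_critical_routes
-- ===== SOURCE A (Python) =====
-- from typing import Dict, Any, List, Optional
--
-- def _identify_critical_routes(in_service_trains: List[Dict[str, Any]]) -> List[str]:
--     """
--     Identify critical routes based on train distribution.
--
--     Args:
--         in_service_trains: Trains currently in service
--
--     Returns:
--         List of critical route names
--     """
--     # Count trains per route
--     route_counts: Dict[str, int] = {}
--     for train in in_service_trains:
--         route = train.get("currentRoute") or train.get("route")
--         if route:
--             route_counts[route] = route_counts.get(route, 0) + 1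
--
--     # Identify routes with most trains (likely critical)
--     if route_counts:
--         sorted_routes = sorted(route_counts.items(), key=lambda x: x[1], reverse=True)
--         return [route for route, _ in sorted_routes[:2]]  # Top 2 routes
--
--     return ["Route 1", "Route 2"]  # Default
-- ===== SOURCE B (Python) =====
-- def _identify_critical_routes(in_service_trains):
--     # Same counting loop and default as A; top-2 selection is a single pass
--     # keeping an ordered short list instead of sorting all routes.
--     route_counts = {}
--     for train in in_service_trains:
--         route = train.get("currentRoute") or train.get("route")
--         if route:
--             route_counts[route] = route_counts.get(route, 0) + 1
--
--     if not route_counts: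
--         return ["Route 1", "Route 2"]
--
--     top = []  # at most two (route, count) pairs, counts descending, ties in insertion order
--     for route, count in route_counts.items():
--         i = 0
--         while i < len(top) and count <= top[i][1]:
--             i += 1
--         top.insert(i, (route, count))
--         del top[2:]
--     return [route for route, _ in top]
-- ===== Notes on version B (the rewrite author's own statement) =====
-- stated objective: alternative
-- what changed: Replaces the full stable reverse sort of all route counts by a single pass over the counts that maintains an ordered list of the current top two (inserting ahead only on strictly greater count, so ties keep insertion order like the stable sort).
import Mathlib
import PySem

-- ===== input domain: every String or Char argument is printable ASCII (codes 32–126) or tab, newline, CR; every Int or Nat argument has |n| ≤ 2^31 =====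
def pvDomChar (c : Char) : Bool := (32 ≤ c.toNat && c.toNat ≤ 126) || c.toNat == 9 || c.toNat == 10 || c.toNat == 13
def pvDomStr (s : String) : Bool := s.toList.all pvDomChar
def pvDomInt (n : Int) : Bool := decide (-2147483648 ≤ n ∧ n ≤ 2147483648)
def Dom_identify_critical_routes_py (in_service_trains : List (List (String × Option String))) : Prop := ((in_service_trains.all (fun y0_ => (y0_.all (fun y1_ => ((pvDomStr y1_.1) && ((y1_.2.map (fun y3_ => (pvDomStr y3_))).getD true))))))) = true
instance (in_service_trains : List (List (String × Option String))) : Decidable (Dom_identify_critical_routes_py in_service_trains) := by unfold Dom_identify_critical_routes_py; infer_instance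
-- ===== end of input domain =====

-- B replaces A's full stable reverse sort by a single pass keeping the current top two (alternative decomposition, same results).

-- ===== PORT A =====
-- train.get(k): first-match lookup in the association list, flattened (a stored None and a missing key both give none, as in Python)
def crGet (train : List (String × Option String)) (k : String) : Option String :=
  (PySem.Dict.get? (PySem.Dict.mk train) k).join

-- Python truthiness of an Optional[str]
def crTruthy : Option String → Bool
  | some s => decide (s ≠ "")
  | none => false

-- `train.get("currentRoute") or train.get("route")`
def crRoute (train : List (String × Option String)) : Option String :=
  let a := crGet train "currentRoute"
  if crTruthy a then a else crGet train "route"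

def identify_critical_routes_py (in_service_trains : List (List (String × Option String))) : List String :=
  let route_counts : PySem.Dict String Int :=
    in_service_trains.foldl (fun d train =>
      match crRoute train with
      | some r => if r ≠ "" then PySem.Dict.insert d r (PySem.Dict.getD d r 0 + 1) else d
      | none => d) PySem.Dict.empty
  if route_counts.items ≠ [] then
    ((PySem.List.sorted route_counts.items (fun x => x.2) true).take 2).map Prod.fst
  else ["Route 1", "Route 2"]

-- ===== PORT B =====
-- Source B's insert-in-order step: place x before the first entry with strictly smaller count
def crInsertTop (x : String × Int) : List (String × Int) → List (String × Int)
  | [] => [x]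
  | y :: ys => if y.2 < x.2 then x :: y :: ys else y :: crInsertTop x ys

def identify_critical_routes_py_alt (in_service_trains : List (List (String × Option String))) : List String :=
  let route_counts : PySem.Dict String Int :=
    in_service_trains.foldl (fun d train =>
      match crRoute train with
      | some r => if r ≠ "" then PySem.Dict.insert d r (PySem.Dict.getD d r 0 + 1) else d
      | none => d) PySem.Dict.empty
  if route_counts.items = [] then ["Route 1", "Route 2"]
  else
    -- single pass: insert each (route, count) into the ordered top list, keep at most two (`del top[2:]`)
    (route_counts.items.foldl (fun top x => (crInsertTop x top).take 2) []).map Prod.fst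

-- ===== PRECONDITION & SPEC =====
def Spec_identify_critical_routes_py (in_service_trains : List (List (String × Option String))) (out : List String) : Prop := out = identify_critical_routes_py_alt in_service_trains
instance (in_service_trains : List (List (String × Option String))) (out : List String) : Decidable (Spec_identify_critical_routes_py in_service_trains out) := by unfold Spec_identify_critical_routes_py; infer_instance

-- ===== CLAIM (what is proved, stated in full; the proofs are below) =====
def Claim_equal_identify_critical_routes_py : Prop := ∀ (in_service_trains : List (List (String × Option String))), Dom_identify_critical_routes_py in_service_trains → Spec_identify_critical_routes_py in_service_trains (identify_critical_routes_py in_service_trains)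

-- ===== LEMMAS AND PROOFS =====

-- crInsertTop is insertBy with the strict "greater count" predicate of the stable reverse sort
theorem crInsertTop_eq (x : String × Int) (ys : List (String × Int)) :
    crInsertTop x ys = PySem.List.insertBy (fun a b => decide (b.2 < a.2)) x ys := by
  induction ys with
  | nil => rfl
  | cons y ys ih =>
    by_cases h : y.2 < x.2 <;> simp [crInsertTop, PySem.List.insertBy, h, ih]

-- only the first two entries of the accumulator matter for the first two entries after an insertion
theorem take2_insertBy {α : Type} (bef : α → α → Bool) (x : α) (ys : List α) :
    (PySem.List.insertBy bef x ys).take 2 = (PySem.List.insertBy bef x (ys.take 2)).take 2 := by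
  match ys with
  | [] => rfl
  | [a] => rfl
  | a :: b :: r =>
    simp only [List.take, PySem.List.insertBy]
    split_ifs <;> simp_all

-- the incremental top-2 fold computes the first two entries of the insertion-sort fold
theorem foldl_top2 {α : Type} (bef : α → α → Bool) (l : List α) (acc : List α) :
    l.foldl (fun top x => (PySem.List.insertBy bef x top).take 2) (acc.take 2)
      = (l.foldl (fun a x => PySem.List.insertBy bef x a) acc).take 2 := by
  induction l generalizing acc with
  | nil => rfl
  | cons x l ih =>
    simp only [List.foldl]
    rw [← take2_insertBy]
    exact ih _

-- the two selection phases agree for any list of (route, count) items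
theorem crSelect_eq (items : List (String × Int)) :
    (if items ≠ [] then ((PySem.List.sorted items (fun x => x.2) true).take 2).map Prod.fst
     else ["Route 1", "Route 2"])
      = (if items = [] then ["Route 1", "Route 2"]
         else (items.foldl (fun top x => (crInsertTop x top).take 2) []).map Prod.fst) := by
  by_cases h : items = []
  · simp [h]
  · simp only [h, ne_eq, not_false_iff, if_true, if_neg]
    rw [PySem.List.sorted_rev_eq_foldl_insertBy]
    have h2 := foldl_top2 (fun a b : String × Int => decide (b.2 < a.2)) items []
    simp only [List.take_nil] at h2
    rw [← h2]
    simp [crInsertTop_eq]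

-- ===== VERDICT (by name: the statement is the Claim_ definition above) =====
theorem identify_critical_routes_py_spec : Claim_equal_identify_critical_routes_py := by
  intro ts _
  unfold Spec_identify_critical_routes_py identify_critical_routes_py identify_critical_routes_py_alt
  exact crSelect_eq _
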